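-- pv_equiv track=rewrite | github.com/ETS-Next-Gen/AWE_Workbench | examples/multiple_essay_report.py | prepareAcademicWordInfo
-- ===== SOURCE A (Python) =====
-- def prepareAcademicWordInfo(academics, latinates, tokens):
--     academic_words = []
--     for i, token in enumerate(tokens):
--         if academics[i] is not None and academics[i] \
--            or latinates[i] is not None and latinates[i]:
--             if token.lower() not in academic_words:
--                 academic_words.append(token.lower())
--     academic_words = sorted(academic_words)
--     outhtml = '<!DOCTYPE html><html><head></head><body><p><b>'
--     outhtml += ', '.join(academic_words) + '</b></p>'
--     for i, token in enumerate(tokens):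
--         if academics[i] is not None and academics[i] \
--            or latinates[i] is not None and latinates[i]:
--             outhtml += '<span style="background-color: #ffff00 ">' \
--                         + token \
--                         + '</span> '
--         else:
--             outhtml += token + ' '
--     outhtml += '</body></html>'
--     outhtml = outhtml.replace('\n', '<br />')
--     return academic_words, outhtml
-- ===== SOURCE B (Python) =====
-- def prepareAcademicWordInfo(academics, latinates, tokens):
--     def flagged(i):
--         return (academics[i] is not None and academics[i]) \
--             or (latinates[i] is not None and latinates[i])
--     flags = [flagged(i) for i in range(len(tokens))]
--     # sort ALL flagged lowercased words (with duplicates), then drop adjacent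
--     # repeats in one scan -- instead of A's linear membership scan per token.
--     academic_words = []
--     for w in sorted(t.lower() for t, f in zip(tokens, flags) if f):
--         if academic_words[-1:] != [w]:
--             academic_words.append(w)
--     body = ''.join(
--         '<span style="background-color: #ffff00 ">' + t + '</span> ' if f
--         else t + ' '
--         for t, f in zip(tokens, flags))
--     outhtml = ('<!DOCTYPE html><html><head></head><body><p><b>'
--                + ', '.join(academic_words) + '</b></p>' + body
--                + '</body></html>').replace('\n', '<br />')
--     return academic_words, outhtml
-- ===== Notes on version B (the rewrite author's own statement) =====
-- stated objective: faster
-- what changed: B precomputes the flag vector once, dedups by sorting ALL flagged lowercased words (with duplicates) and dropping adjacent repeats in one scan instead of A's per-token linear membership scan on a growing list, and builds the HTML body as a single join of mapped pieces instead of repeated string concatenation.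
import Mathlib
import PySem

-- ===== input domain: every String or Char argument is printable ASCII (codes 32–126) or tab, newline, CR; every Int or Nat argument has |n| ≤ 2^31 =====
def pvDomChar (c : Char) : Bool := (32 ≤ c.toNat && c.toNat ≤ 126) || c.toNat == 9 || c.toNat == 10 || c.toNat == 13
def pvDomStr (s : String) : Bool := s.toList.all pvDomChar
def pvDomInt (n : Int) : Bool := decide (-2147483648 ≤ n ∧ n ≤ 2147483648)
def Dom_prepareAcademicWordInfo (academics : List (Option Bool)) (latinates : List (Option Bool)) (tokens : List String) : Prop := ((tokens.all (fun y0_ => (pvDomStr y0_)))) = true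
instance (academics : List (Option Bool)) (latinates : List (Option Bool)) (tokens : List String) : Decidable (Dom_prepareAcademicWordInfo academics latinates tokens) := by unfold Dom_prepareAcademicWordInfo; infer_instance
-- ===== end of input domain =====

-- B replaces A's per-token linear membership scan by sort-all-then-drop-adjacent-duplicates,
-- precomputes the flag vector once, and joins the HTML pieces once (alternative decomposition, same results).

-- ===== PORT A =====
-- 'academics[i] is not None and academics[i] or latinates[i] is not None and latinates[i]'
-- (an Option Bool is truthy-and-not-None exactly when it is 'some true'; in-range under Pre_)
def pvFlagged (academics : List (Option Bool)) (latinates : List (Option Bool)) (i : Int) : Bool :=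
  (PySem.List.pyGetD academics i none == some true) ||
  (PySem.List.pyGetD latinates i none == some true)

def prepareAcademicWordInfo (academics : List (Option Bool)) (latinates : List (Option Bool)) (tokens : List String) : List String × String :=
  let academic_words : List String :=
    (PySem.List.enumerate tokens).foldl (fun aw p =>
      if pvFlagged academics latinates p.1 then
        if (PySem.Str.lower p.2) ∈ aw then aw else aw ++ [PySem.Str.lower p.2]
      else aw) []
  let academic_words := PySem.List.sorted academic_words (fun x => x) false
  let outhtml := "<!DOCTYPE html><html><head></head><body><p><b>"
  let outhtml := outhtml ++ PySem.Str.join ", " academic_words ++ "</b></p>"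
  let outhtml :=
    (PySem.List.enumerate tokens).foldl (fun out p =>
      if pvFlagged academics latinates p.1 then
        out ++ "<span style=\"background-color: #ffff00 \">" ++ p.2 ++ "</span> "
      else out ++ p.2 ++ " ") outhtml
  let outhtml := outhtml ++ "</body></html>"
  let outhtml := PySem.Str.replace outhtml "\n" "<br />"
  (academic_words, outhtml)

-- ===== PORT B =====
def prepareAcademicWordInfo_alt (academics : List (Option Bool)) (latinates : List (Option Bool)) (tokens : List String) : List String × String :=
  let flags : List Bool :=
    (PySem.List.pyRange 0 (tokens.length : Int) 1).map (fun i => pvFlagged academics latinates i)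
  -- 'if academic_words[-1:] != [w]: append' — append unless the list ends in w
  let academic_words : List String :=
    (PySem.List.sorted (((tokens.zip flags).filter (fun p => p.2)).map
        (fun p => PySem.Str.lower p.1)) (fun x => x) false).foldl
      (fun acc w => if acc.getLast? = some w then acc else acc ++ [w]) []
  let body : String :=
    PySem.Str.join "" ((tokens.zip flags).map (fun p =>
      if p.2 then "<span style=\"background-color: #ffff00 \">" ++ p.1 ++ "</span> "
      else p.1 ++ " "))
  let outhtml := PySem.Str.replace
      ("<!DOCTYPE html><html><head></head><body><p><b>"
        ++ PySem.Str.join ", " academic_words ++ "</b></p>" ++ body ++ "</body></html>")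
      "\n" "<br />"
  (academic_words, outhtml)

-- ===== PRECONDITION & SPEC =====
-- Pre_ is exactly where Python A returns: every index into academics is in range, and latinates[i]
-- is in range whenever it is reached (the 'or' short-circuits when academics[i] is a truthy value).
def Pre_prepareAcademicWordInfo (academics : List (Option Bool)) (latinates : List (Option Bool)) (tokens : List String) : Prop :=
  ∀ i ∈ List.range tokens.length,
    i < academics.length ∧ (academics.getD i none = some true ∨ i < latinates.length)
instance (academics : List (Option Bool)) (latinates : List (Option Bool)) (tokens : List String) : Decidable (Pre_prepareAcademicWordInfo academics latinates tokens) := by unfold Pre_prepareAcademicWordInfo; infer_instance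

def pvWitness_prepareAcademicWordInfo : List (Option Bool) × List (Option Bool) × List String :=
  ([some true, none], [none, some false], ["Analyze\n", "analyze"])

def Spec_prepareAcademicWordInfo (academics : List (Option Bool)) (latinates : List (Option Bool)) (tokens : List String) (out : List String × String) : Prop := out = prepareAcademicWordInfo_alt academics latinates tokens
instance (academics : List (Option Bool)) (latinates : List (Option Bool)) (tokens : List String) (out : List String × String) : Decidable (Spec_prepareAcademicWordInfo academics latinates tokens out) := by unfold Spec_prepareAcademicWordInfo; infer_instance

-- ===== CLAIM (what is proved, stated in full; the proofs are below) =====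
def Claim_equal_prepareAcademicWordInfo : Prop := ∀ (academics : List (Option Bool)) (latinates : List (Option Bool)) (tokens : List String), Dom_prepareAcademicWordInfo academics latinates tokens → Pre_prepareAcademicWordInfo academics latinates tokens → Spec_prepareAcademicWordInfo academics latinates tokens (prepareAcademicWordInfo academics latinates tokens)

-- ===== LEMMAS AND PROOFS =====

-- zipping a list with the flag values of its own indices is mapping over its enumeration
theorem pv_zip_range_map {α : Type} (f : Int → Bool) :
    ∀ (xs : List α) (s : Int),
      xs.zip ((PySem.List.pyRange s (s + xs.length) 1).map f)
        = (PySem.List.enumerate xs s).map (fun p => (p.2, f p.1)) := by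
  intro xs
  induction xs with
  | nil => intro s; simp [PySem.List.enumerate]
  | cons x t ih =>
      intro s
      have hlen : (((x :: t).length : Nat) : Int) = (t.length : Int) + 1 := by
        simp
      rw [hlen, show s + ((t.length : Int) + 1) = (s + 1) + (t.length : Int) from by omega,
        PySem.List.pyRange_one_cons (by omega), PySem.List.enumerate_cons]
      simp only [List.map_cons, List.zip_cons_cons, ih (s + 1)]

-- A's membership-dedup loop over flagged tokens builds set(flagged lowered tokens)
theorem pv_cond_add_fold (a la : List (Option Bool)) :
    ∀ (l : List (Int × String)) (acc : List String),
      l.foldl (fun aw p =>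
        if pvFlagged a la p.1 then
          if (PySem.Str.lower p.2) ∈ aw then aw else aw ++ [PySem.Str.lower p.2]
        else aw) acc
      = ((l.filter (fun p => pvFlagged a la p.1)).map (fun p => PySem.Str.lower p.2)).foldl
          PySem.Set.add acc := by
  intro l
  induction l with
  | nil => intro acc; rfl
  | cons h t ih =>
      intro acc
      by_cases hf : pvFlagged a la h.1 = true
      · simp only [List.foldl_cons, List.filter_cons, hf, if_pos, List.map_cons,
          PySem.Set.add_eq_ite]
        exact ih _
      · simp only [List.foldl_cons, List.filter_cons, hf]
        simpa using ih acc

-- in a strictly increasing list an upper-bound member is the last element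
theorem pv_last_of_max : ∀ (acc : List String) (w : String),
    acc.Pairwise (· < ·) → w ∈ acc → (∀ a ∈ acc, a ≤ w) → acc.getLast? = some w := by
  intro acc
  induction acc with
  | nil => intro w _ hw _; cases hw
  | cons a t ih =>
      intro w hp hw hub
      rcases t with _ | ⟨b, t'⟩
      · simp at hw; simp [hw]
      · have hab : a < b := (List.pairwise_cons.1 hp).1 b (by simp)
        have hwt : w ∈ b :: t' := by
          rcases List.mem_cons.1 hw with h | h
          · subst h
            exact absurd (lt_of_lt_of_le hab (hub b (by simp))) (lt_irrefl _)
          · exact h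
        have := ih w (List.pairwise_cons.1 hp).2 hwt (fun x hx => hub x (by simp [hx]))
        rw [List.getLast?_cons_cons] at *
        exact this

-- the adjacent-duplicate-dropping scan over a ≤-sorted list: strictly sorted result, same members
theorem pv_adjdedup_spec : ∀ (l acc : List String),
    l.Pairwise (· ≤ ·) → acc.Pairwise (· < ·) → (∀ a ∈ acc, ∀ x ∈ l, a ≤ x) →
    (l.foldl (fun acc w => if acc.getLast? = some w then acc else acc ++ [w]) acc).Pairwise (· < ·)
    ∧ (∀ y, y ∈ l.foldl (fun acc w => if acc.getLast? = some w then acc else acc ++ [w]) acc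
          ↔ y ∈ acc ∨ y ∈ l) := by
  intro l
  induction l with
  | nil => intro acc _ hacc _; exact ⟨hacc, by simp⟩
  | cons w t ih =>
      intro acc hl hacc hinv
      have htp : t.Pairwise (· ≤ ·) := (List.pairwise_cons.1 hl).2
      have hwt : ∀ x ∈ t, w ≤ x := (List.pairwise_cons.1 hl).1
      by_cases hlast : acc.getLast? = some w
      · have hwacc : w ∈ acc := by
          have := List.mem_of_getLast? (l := acc) (a := w) hlast
          exact this
        simp only [List.foldl_cons, if_pos hlast]
        obtain ⟨h1, h2⟩ := ih acc htp hacc (fun a ha x hx => hinv a ha x (by simp [hx]))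
        refine ⟨h1, fun y => ?_⟩
        rw [h2 y]
        constructor
        · rintro (h | h) <;> simp [h]
        · rintro (h | h)
          · exact Or.inl h
          · rcases List.mem_cons.1 h with h | h
            · exact Or.inl (h ▸ hwacc)
            · exact Or.inr h
      · simp only [List.foldl_cons, if_neg hlast]
        have hlt : ∀ a ∈ acc, a < w := by
          intro a ha
          have hle : a ≤ w := hinv a ha w (by simp)
          rcases lt_or_eq_of_le hle with h | h
          · exact h
          · exfalso
            apply hlast
            apply pv_last_of_max acc w hacc (h ▸ ha)
            intro b hb; exact hinv b hb w (by simp)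
        have hacc' : (acc ++ [w]).Pairwise (· < ·) := by
          rw [List.pairwise_append]
          exact ⟨hacc, List.pairwise_singleton _ _, fun a ha b hb => by
            simp at hb; exact hb ▸ hlt a ha⟩
        have hinv' : ∀ a ∈ acc ++ [w], ∀ x ∈ t, a ≤ x := by
          intro a ha x hx
          rcases List.mem_append.1 ha with h | h
          · exact hinv a h x (by simp [hx])
          · simp at h; exact h ▸ hwt x hx
        obtain ⟨h1, h2⟩ := ih (acc ++ [w]) htp hacc' hinv'
        refine ⟨h1, fun y => ?_⟩
        rw [h2 y]
        simp only [List.mem_append, List.mem_cons]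
        tauto

-- ''.join of one more piece at the front
theorem pv_join_cons (x : String) (parts : List String) :
    PySem.Str.join "" (x :: parts) = x ++ PySem.Str.join "" parts := by
  have h : (PySem.Str.join "" (x :: parts)).toList = (x ++ PySem.Str.join "" parts).toList := by
    simp only [PySem.Str.toList_join, String.toList_append, List.map_cons]
    cases parts <;> simp [PySem.Chars.join, List.intercalate]
  exact String.toList_injective h

-- A's string-accumulating loop is the one-shot join of the mapped pieces
theorem pv_fold_join (a la : List (Option Bool)) :
    ∀ (l : List (Int × String)) (s : String),
      l.foldl (fun out p =>
        if pvFlagged a la p.1 then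
          out ++ "<span style=\"background-color: #ffff00 \">" ++ p.2 ++ "</span> "
        else out ++ p.2 ++ " ") s
      = s ++ PySem.Str.join "" (l.map (fun p =>
          if pvFlagged a la p.1 then
            "<span style=\"background-color: #ffff00 \">" ++ p.2 ++ "</span> "
          else p.2 ++ " ")) := by
  intro l
  induction l with
  | nil => intro s; simp [PySem.Str.join]
  | cons h t ih =>
      intro s
      simp only [List.foldl_cons, List.map_cons, pv_join_cons]
      by_cases hf : pvFlagged a la h.1 = true
      · rw [if_pos hf, if_pos hf, ih]
        simp [String.append_assoc]
      · rw [if_neg hf, if_neg hf, ih]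
        simp [String.append_assoc]

-- ===== VERDICT (by name: the statement is the Claim_ definition above) =====
theorem prepareAcademicWordInfo_spec : Claim_equal_prepareAcademicWordInfo := by
  intro academics latinates tokens _ _
  unfold Spec_prepareAcademicWordInfo prepareAcademicWordInfo prepareAcademicWordInfo_alt
  dsimp only
  have h0 := pv_zip_range_map (pvFlagged academics latinates) tokens 0
  rw [zero_add] at h0
  -- the raw flagged-lowered word list, via either traversal
  have hraw : ((tokens.zip ((PySem.List.pyRange 0 (tokens.length : Int) 1).map
        (fun i => pvFlagged academics latinates i))).filter (fun p => p.2)).map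
        (fun p => PySem.Str.lower p.1)
      = ((PySem.List.enumerate tokens).filter (fun p => pvFlagged academics latinates p.1)).map
        (fun p => PySem.Str.lower p.2) := by
    rw [h0, List.filter_map, List.map_map]
    rfl
  have hbody : (tokens.zip ((PySem.List.pyRange 0 (tokens.length : Int) 1).map
        (fun i => pvFlagged academics latinates i))).map (fun p =>
          if p.2 then "<span style=\"background-color: #ffff00 \">" ++ p.1 ++ "</span> "
          else p.1 ++ " ")
      = (PySem.List.enumerate tokens).map (fun p =>
          if pvFlagged academics latinates p.1 then
            "<span style=\"background-color: #ffff00 \">" ++ p.2 ++ "</span> "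
          else p.2 ++ " ") := by
    rw [h0, List.map_map]
    rfl
  set rawA := ((PySem.List.enumerate tokens).filter
      (fun p => pvFlagged academics latinates p.1)).map
      (fun p => PySem.Str.lower p.2) with hrawA
  have hA : (PySem.List.enumerate tokens).foldl (fun aw p =>
        if pvFlagged academics latinates p.1 then
          if (PySem.Str.lower p.2) ∈ aw then aw else aw ++ [PySem.Str.lower p.2]
        else aw) [] = PySem.Set.ofList rawA := by
    rw [pv_cond_add_fold, hrawA]
    rfl
  -- the two academic_words lists coincide
  obtain ⟨hstrict, hmem⟩ := pv_adjdedup_spec (PySem.List.sorted rawA (fun x => x) false) []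
    (by simpa using PySem.List.sorted_pairwise rawA (fun x => x))
    List.Pairwise.nil (by simp)
  have hwords : PySem.List.sorted (PySem.Set.ofList rawA) (fun x => x) false
      = (PySem.List.sorted rawA (fun x => x) false).foldl
          (fun acc w => if acc.getLast? = some w then acc else acc ++ [w]) [] := by
    refine PySem.List.sorted_eq_of_perm_of_pairwise_lt _ _ (fun x => x) ?_ hstrict
    refine (List.perm_ext_iff_of_nodup (hstrict.imp ne_of_lt) (PySem.Set.nodup_ofList rawA)).2
      (fun y => ?_)
    rw [hmem y, PySem.Set.mem_ofList]
    simp [PySem.List.mem_sorted]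
  rw [hraw, hbody, hA, pv_fold_join, hwords]
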